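/- GENERATED by farm/mkstatement.py from design/units.split.tsv — do not edit.
   THE SPLIT of the proof unit `start_decoder.F5` into `start_decoder.F5a`, `start_decoder.F5b`, `start_decoder.F5c`, `start_decoder.F5d`, `start_decoder.F5e`, `start_decoder.F5f`: the children's statements give the parent's
   UNCHANGED statement (so nothing above the parent — callers, compositions — is touched by the split). -/
import Vorbis.Spec.StartDecoderF5
import Vorbis.Spec.Units.start_decoder_F5
import Vorbis.Spec.Units.start_decoder_F5a
import Vorbis.Spec.Units.start_decoder_F5b
import Vorbis.Spec.Units.start_decoder_F5c
import Vorbis.Spec.Units.start_decoder_F5d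
import Vorbis.Spec.Units.start_decoder_F5e
import Vorbis.Spec.Units.start_decoder_F5f
namespace Vorbis.Spec.Splits
open X86 X86.User Asan

/-- The children of the split unit `start_decoder.F5` prove it, by `Vorbis.Spec.StartDecoder.SegF5.of_parts`. -/
theorem start_decoder_F5
    (h_start_decoder_F5a : Vorbis.Spec.start_decoder_F5a.Statement)
    (h_start_decoder_F5b : Vorbis.Spec.start_decoder_F5b.Statement)
    (h_start_decoder_F5c : Vorbis.Spec.start_decoder_F5c.Statement)
    (h_start_decoder_F5d : Vorbis.Spec.start_decoder_F5d.Statement)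
    (h_start_decoder_F5e : Vorbis.Spec.start_decoder_F5e.Statement)
    (h_start_decoder_F5f : Vorbis.Spec.start_decoder_F5f.Statement) :
    Vorbis.Spec.start_decoder_F5.Statement := by
  intro Lay _hLay μ _hμ u₀ _hcode _h_get_bits _h_asan_store1_noabort _h_asan_store2_noabort _h_asan_store4_noabort _h_asan_load1_noabort _h_asan_load4_noabort
  apply Vorbis.Spec.StartDecoder.SegF5.of_parts
  · exact h_start_decoder_F5a Lay _hLay μ _hμ u₀ _hcode _h_get_bits
  · exact h_start_decoder_F5b Lay _hLay μ _hμ u₀ _hcode _h_get_bits _h_asan_store1_noabort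
  · exact h_start_decoder_F5c Lay _hLay μ _hμ u₀ _hcode _h_asan_store1_noabort _h_asan_store2_noabort _h_asan_store4_noabort
  · exact h_start_decoder_F5d Lay _hLay μ _hμ u₀ _hcode _h_asan_load1_noabort
  · exact h_start_decoder_F5e Lay _hLay μ _hμ u₀ _hcode _h_get_bits _h_asan_load1_noabort
  · exact h_start_decoder_F5f Lay _hLay μ _hμ u₀ _hcode _h_asan_store2_noabort _h_asan_load4_noabort

end Vorbis.Spec.Splits
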